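-- pv_equiv track=rewrite | github.com/croningp/oligoss | polymersoup/silico/helpers/helpers.py | remove_substrings_sequence
-- ===== SOURCE A (Python) =====
-- def remove_substrings_sequence(
--     sequence,
--     substring_markers={
--         '(': ')',
--         '~[': ']',
--         '[': ']'
--     },
--     return_substrings=False
-- ):
--     """
--     Takes a sequence and removes substrings corresponding to modifications.
--
--     Args:
--         sequence (str): sequence string comprised of monomers one letter codes
--             and / or modification substrings
--         substring_markers (dict, optional): dictionary of chars marking the
--             start of substrings and chars marking their end. Defaults to {
--                 '(': ')',
--                 '~[': ']',
--                 '[' : ']'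
--             }
--         return_substrings (bool, optional): specify whether to return substrings
--             or sequence with substrings removed. if False, sequence is returned;
--             if True, list of substrings are returned
--
--     Returns:
--         str: sequence string with substrings removed
--     """
--     # init list to store indices in string that are within modificiation
--     # substrings
--     mod_indices = []
--
--     # init list to store substrings
--     substrings = []
--
--     # iterate through sequence, identifying modification substrings and adding
--     # their indices to mod_indices
--     for i, c in enumerate(sequence):
--
--         if c in substring_markers:
--
--             mod_end = min([
--                 j for j, d in enumerate(sequence)
--                 if d == substring_markers[c] and j > i
--             ])
--
--             mod_indices.extend([x for x in range(i, mod_end + 1)])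
--             substring = sequence[i:mod_indices[-1] + 1]
--             substrings.append(substring)
--
--     # check whether substrings are to be returned
--     if return_substrings:
--         return substrings
--
--     # create new, trimmed sequence from indices that are NOT within modification
--     # substrings
--     sequence = "".join([
--         c for i, c in enumerate(sequence)
--         if i not in mod_indices
--     ])
--
--     return sequence
-- ===== SOURCE B (Python) =====
-- def remove_substrings_sequence(
--     sequence,
--     substring_markers={
--         '(': ')',
--         '~[': ']',
--         '[': ']'
--     },
--     return_substrings=False
-- ):
--     """
--     Removes (or returns) bracketed modification substrings from sequence.
--
--     One right-to-left pass records, for every position holding an opening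
--     marker, the index of the nearest matching closing char to its right
--     (a running "nearest occurrence" dict replaces A's inner scans); one
--     left-to-right pass then keeps every character not covered by any
--     opener's interval, tracked with a single running bound.
--     """
--     n = len(sequence)
--     # end_at[i] = index of the nearest closing char after an opener at i
--     end_at = [None] * n
--     last = {}  # char -> nearest index of that char seen so far (to the right)
--     for i in range(n - 1, -1, -1):
--         c = sequence[i]
--         close = substring_markers.get(c)
--         if close is not None:
--             end_at[i] = last.get(close)
--         last[c] = i
--
--     out = []
--     substrings = []
--     skip_until = -1
--     for i, c in enumerate(sequence):
--         if c in substring_markers: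
--             end = end_at[i]
--             if end is None:
--                 raise ValueError("no closing marker for %r" % c)
--             substrings.append(sequence[i:end + 1])
--             if end > skip_until:
--                 skip_until = end
--         if i > skip_until:
--             out.append(c)
--
--     if return_substrings:
--         return substrings
--     return "".join(out)
-- ===== Notes on version B (the rewrite author's own statement) =====
-- stated objective: alternative
-- what changed: replaces A's per-opener full-string scan for the closing marker and A's final list-membership filter over mod_indices with one right-to-left pass building a nearest-closer table and one left-to-right pass keeping a single running skip bound
-- outside the precondition, e.g. on remove_substrings_sequence('(ab)', {'(': ')', '~[': ']', '[': ']'}, True): A returns ['(ab)'], B returns ['(ab)']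
import Mathlib
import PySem

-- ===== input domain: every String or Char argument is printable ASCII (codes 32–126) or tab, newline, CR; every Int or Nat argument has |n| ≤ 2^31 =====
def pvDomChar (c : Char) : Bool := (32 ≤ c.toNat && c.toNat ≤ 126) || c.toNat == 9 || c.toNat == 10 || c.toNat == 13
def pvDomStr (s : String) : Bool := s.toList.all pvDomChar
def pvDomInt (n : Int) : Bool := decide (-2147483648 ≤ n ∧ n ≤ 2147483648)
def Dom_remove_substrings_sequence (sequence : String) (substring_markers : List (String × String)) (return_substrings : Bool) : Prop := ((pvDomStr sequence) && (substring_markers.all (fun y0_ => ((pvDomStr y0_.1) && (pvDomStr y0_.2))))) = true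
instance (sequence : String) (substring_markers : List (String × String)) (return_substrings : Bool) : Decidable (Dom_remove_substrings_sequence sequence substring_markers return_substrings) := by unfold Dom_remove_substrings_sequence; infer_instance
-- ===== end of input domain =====

-- B replaces A's per-opener rescan of the whole string (and the `index not in
-- mod_indices` list scan) by a right-to-left nearest-closer table plus a single
-- left-to-right pass with a running skip bound.

-- ===== PORT A =====
-- min([j for j, d in enumerate(sequence) if d == substring_markers[c] and j > i])
def pvMinJ (cs : List Char) (close : String) (i : Nat) : Option Nat :=
  PySem.List.min?
    (((cs.zipIdx).filter (fun q => String.ofList [q.1] == close && decide (i < q.2))).map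
      (fun q => q.2)) (fun x => x)

-- body of A's `for i, c in enumerate(sequence)` loop; state = (mod_indices, substrings)
def pvAStep (cs : List Char) (markers : PySem.Dict String String)
    (st : List Int × List String) (p : Char × Nat) : List Int × List String :=
  match markers.get? (String.ofList [p.1]) with
  | none => st
  | some close =>
    match pvMinJ cs close p.2 with
    | none => st   -- Python: min() of an empty list raises ValueError; Pre_ excludes this
    | some modEnd =>
      let modIdx := st.1 ++ PySem.List.pyRange (p.2 : Int) ((modEnd : Int) + 1) 1
      let sub := String.ofList (PySem.List.slice cs (some (p.2 : Int))
        (some (PySem.List.pyGetD modIdx (-1) 0 + 1)))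
      (modIdx, st.2 ++ [sub])

def remove_substrings_sequence (sequence : String) (substring_markers : List (String × String)) (return_substrings : Bool) : String :=
  let cs := sequence.toList
  let markers := PySem.Dict.mk substring_markers
  let st := (cs.zipIdx).foldl (pvAStep cs markers) ([], [])
  if return_substrings then ""   -- Python returns the LIST of substrings here (not a str); Pre_ excludes it
  else String.ofList (((cs.zipIdx).filter (fun p => !(st.1.contains ((p.2 : Int))))).map (fun p => p.1))

-- ===== PORT B =====
-- Source B's right-to-left prepass (`for i in range(n-1, -1, -1)`), transcribed as
-- structural recursion over the reversed index/char list; `last` is the dict.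
def pvBPre (markers : PySem.Dict String String) :
    List (Char × Nat) → PySem.Dict String Int → List (Option Int)
  | [], _ => []
  | p :: rest, last =>
    let e : Option Int :=
      match markers.get? (String.ofList [p.1]) with
      | none => none
      | some close => last.get? close
    e :: pvBPre markers rest (last.insert (String.ofList [p.1]) (p.2 : Int))

-- body of Source B's second loop; state = (out, substrings, skip_until)
def pvBStep (cs : List Char) (markers : PySem.Dict String String) (endAt : List (Option Int))
    (st : List Char × List String × Int) (p : Char × Nat) : List Char × List String × Int :=
  let st1 :=
    if markers.contains (String.ofList [p.1]) then
      match endAt.getD p.2 none with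
      | none => st   -- Source B raises ValueError here; Pre_ excludes this
      | some e =>
        (st.1,
         st.2.1 ++ [String.ofList (PySem.List.slice cs (some (p.2 : Int)) (some (e + 1)))],
         if e > st.2.2 then e else st.2.2)
    else st
  if (p.2 : Int) > st1.2.2 then (st1.1 ++ [p.1], st1.2.1, st1.2.2) else st1

def remove_substrings_sequence_alt (sequence : String) (substring_markers : List (String × String)) (return_substrings : Bool) : String :=
  let cs := sequence.toList
  let markers := PySem.Dict.mk substring_markers
  let endAt := (pvBPre markers (cs.zipIdx).reverse PySem.Dict.empty).reverse
  let st := (cs.zipIdx).foldl (pvBStep cs markers endAt) ([], [], -1)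
  if return_substrings then ""   -- Source B returns the LIST of substrings here (not a str); Pre_ excludes it
  else String.ofList st.1

-- ===== PRECONDITION & SPEC =====
-- every opening marker occurring in the sequence has a matching closing char later on
def pvPreOk (cs : List Char) (markers : List (String × String)) : Bool :=
  (cs.zipIdx).all (fun p =>
    match (PySem.Dict.mk markers).get? (String.ofList [p.1]) with
    | none => true
    | some close => (cs.zipIdx).any (fun q => String.ofList [q.1] == close && decide (p.2 < q.2)))

-- Pre_ excludes (a) return_substrings = true, where A returns a LIST of substrings, not a
-- value of the declared str type, and (b) sequences in which some opening marker has no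
-- matching closing char after it, where A raises ValueError (min of an empty list).
def Pre_remove_substrings_sequence (sequence : String) (substring_markers : List (String × String)) (return_substrings : Bool) : Prop :=
  return_substrings = false ∧ pvPreOk sequence.toList substring_markers = true
instance (sequence : String) (substring_markers : List (String × String)) (return_substrings : Bool) : Decidable (Pre_remove_substrings_sequence sequence substring_markers return_substrings) := by unfold Pre_remove_substrings_sequence; infer_instance

def pvWitness_remove_substrings_sequence : String × (List (String × String)) × Bool :=
  ("(a)b[cd]e", [("(", ")"), ("~[", "]"), ("[", "]")], false)

def Spec_remove_substrings_sequence (sequence : String) (substring_markers : List (String × String)) (return_substrings : Bool) (out : String) : Prop := out = remove_substrings_sequence_alt sequence substring_markers return_substrings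
instance (sequence : String) (substring_markers : List (String × String)) (return_substrings : Bool) (out : String) : Decidable (Spec_remove_substrings_sequence sequence substring_markers return_substrings out) := by unfold Spec_remove_substrings_sequence; infer_instance

-- ===== CLAIM (what is proved, stated in full; the proofs are below) =====
def Claim_equal_remove_substrings_sequence : Prop := ∀ (sequence : String) (substring_markers : List (String × String)) (return_substrings : Bool), Dom_remove_substrings_sequence sequence substring_markers return_substrings → Pre_remove_substrings_sequence sequence substring_markers return_substrings → Spec_remove_substrings_sequence sequence substring_markers return_substrings (remove_substrings_sequence sequence substring_markers return_substrings)

-- ===== LEMMAS AND PROOFS =====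

-- the first index j ≥ k with String.ofList [cs[j]] = s (head of an increasing candidate list)
def pvLeast (cs : List Char) (s : String) (k : Nat) : Option Nat :=
  (((cs.zipIdx).filter (fun q => String.ofList [q.1] == s && decide (k ≤ q.2))).map
    (fun q => q.2)).head?

def pvQ (cs : List Char) (s : String) (k j : Nat) : Prop :=
  k ≤ j ∧ ∃ c, cs[j]? = some c ∧ String.ofList [c] = s

-- closing index of the opener p, as B's prepass records it
def pvEA (cs : List Char) (M : PySem.Dict String String) (p : Char × Nat) : Option Int :=
  match M.get? (String.ofList [p.1]) with
  | none => none
  | some close => (pvMinJ cs close p.2).map (fun j => (j : Int))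

def pvEndAt (cs : List Char) (M : PySem.Dict String String) : List (Option Int) :=
  (cs.zipIdx).map (pvEA cs M)

-- the indices A's step appends for the element p
def pvGA (cs : List Char) (M : PySem.Dict String String) (p : Char × Nat) : List Int :=
  match M.get? (String.ofList [p.1]) with
  | none => []
  | some close =>
    match pvMinJ cs close p.2 with
    | none => []
    | some e => PySem.List.pyRange (p.2 : Int) ((e : Int) + 1) 1

-- index kk lies inside some opener's modification substring
def pvCov (cs : List Char) (M : PySem.Dict String String) (kk : Nat) : Prop :=
  ∃ p ∈ cs.zipIdx, ∃ close e, M.get? (String.ofList [p.1]) = some close ∧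
    pvMinJ cs close p.2 = some e ∧ p.2 ≤ kk ∧ kk ≤ e

-- Boolean form of pvCov (used inside List.filter)
def pvCovB (cs : List Char) (M : PySem.Dict String String) (kk : Nat) : Bool :=
  (cs.zipIdx).any (fun p =>
    match M.get? (String.ofList [p.1]) with
    | none => false
    | some close =>
      match pvMinJ cs close p.2 with
      | none => false
      | some e => decide (p.2 ≤ kk ∧ kk ≤ e))

-- B's skip_until after the processed prefix l
def pvSkip (cs : List Char) (M : PySem.Dict String String) (l : List (Char × Nat)) : Int :=
  (l.filterMap (pvEA cs M)).foldl max (-1)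

lemma pv_mem_zipIdx_iff (cs : List Char) (p : Char × Nat) :
    p ∈ cs.zipIdx ↔ cs[p.2]? = some p.1 := by
  constructor
  · intro h
    obtain ⟨i, hi, he⟩ := List.mem_iff_getElem.mp h
    rw [List.getElem_zipIdx] at he
    have h2 : p.2 = i := by rw [← he]; simp
    have h1 : p.1 = cs[i]'(by simpa using hi) := by rw [← he]
    subst h2
    rw [h1, List.getElem?_eq_getElem]
  · intro h
    obtain ⟨hlt, heq⟩ := List.getElem?_eq_some_iff.mp h
    have : cs.zipIdx[p.2]'(by simpa using hlt) = (cs[p.2], p.2) := by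
      simp [List.getElem_zipIdx]
    have hm := List.getElem_mem (l := cs.zipIdx) (n := p.2) (by simpa using hlt)
    rw [this] at hm
    cases p with
    | mk a b =>
      simp only at heq hm ⊢
      rw [heq] at hm
      simpa using hm

lemma pv_head_least (l : List Nat) (h : l.Pairwise (· < ·)) (m : Nat) :
    l.head? = some m ↔ m ∈ l ∧ ∀ j ∈ l, m ≤ j := by
  cases l with
  | nil => simp
  | cons a t =>
    simp only [List.head?_cons, Option.some.injEq]
    constructor
    · rintro rfl
      refine ⟨by simp, ?_⟩
      intro j hj
      rcases List.mem_cons.mp hj with rfl | hj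
      · exact le_refl _
      · exact le_of_lt ((List.pairwise_cons.mp h).1 j hj)
    · rintro ⟨hm, hmin⟩
      rcases List.mem_cons.mp hm with rfl | hm
      · rfl
      · have h1 := (List.pairwise_cons.mp h).1 m hm
        have h2 := hmin a (by simp)
        omega

lemma pv_js_pairwise (cs : List Char) (P : Char × Nat → Bool) :
    (((cs.zipIdx).filter P).map (fun q => q.2)).Pairwise (· < ·) := by
  have hz : (cs.zipIdx).Pairwise (fun a b : Char × Nat => a.2 < b.2) := by
    rw [List.pairwise_iff_getElem]
    intro i j hi hj hij
    simp only [List.getElem_zipIdx]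
    simpa using hij
  rw [List.pairwise_map]
  exact hz.sublist List.filter_sublist

lemma pv_js_mem (cs : List Char) (s : String) (k j : Nat) :
    (j ∈ ((cs.zipIdx).filter (fun q => String.ofList [q.1] == s && decide (k ≤ q.2))).map
      (fun q => q.2)) ↔ pvQ cs s k j := by
  simp only [List.mem_map, List.mem_filter, Bool.and_eq_true, beq_iff_eq, decide_eq_true_eq]
  constructor
  · rintro ⟨q, ⟨hq, hs, hk⟩, rfl⟩
    exact ⟨hk, q.1, (pv_mem_zipIdx_iff cs q).mp hq, hs⟩
  · rintro ⟨hk, c, hc, hs⟩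
    exact ⟨(c, j), ⟨(pv_mem_zipIdx_iff cs (c, j)).mpr hc, hs, hk⟩, rfl⟩

lemma pv_mem_take_zipIdx (cs : List Char) (m : Nat) (p : Char × Nat) :
    p ∈ (cs.zipIdx).take m ↔ p.2 < m ∧ cs[p.2]? = some p.1 := by
  constructor
  · intro h
    obtain ⟨i, hi, he⟩ := List.mem_iff_getElem.mp h
    rw [List.getElem_take, List.getElem_zipIdx] at he
    have hlen : i < cs.length := by
      have := hi; simp only [List.length_take, List.length_zipIdx] at this; omega
    have h2 : p.2 = i := by rw [← he]; simp
    have h1 : p.1 = cs[i]'hlen := by rw [← he]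
    subst h2
    constructor
    · have := hi; simp only [List.length_take, List.length_zipIdx] at this; omega
    · rw [h1, List.getElem?_eq_getElem]
  · rintro ⟨hm, hc⟩
    obtain ⟨hlt, heq⟩ := List.getElem?_eq_some_iff.mp hc
    refine List.mem_iff_getElem.mpr ⟨p.2, ?_, ?_⟩
    · simp only [List.length_take, List.length_zipIdx]; omega
    · rw [List.getElem_take, List.getElem_zipIdx]
      cases p with
      | mk a b => simp only at heq ⊢; rw [heq]; simp

lemma pv_min_sorted (l : List Nat) (h : l.Pairwise (· < ·)) :
    PySem.List.min? l (fun x => x) = l.head? := by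
  cases hl : l with
  | nil =>
    have : PySem.List.min? ([] : List Nat) (fun x => x) = none :=
      (PySem.List.min?_eq_none_iff _ _).mpr rfl
    simp [this]
  | cons a t =>
    subst hl
    cases hmin : PySem.List.min? (a :: t) (fun x => x) with
    | none => exact absurd ((PySem.List.min?_eq_none_iff _ _).mp hmin) (by simp)
    | some m =>
      have hmem := PySem.List.min?_mem hmin
      have hismin := PySem.List.min?_isMin hmin
      exact ((pv_head_least _ h m).mpr ⟨hmem, fun j hj => hismin j hj⟩).symm

lemma pvMinJ_eq_pvLeast (cs : List Char) (close : String) (i : Nat) :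
    pvMinJ cs close i = pvLeast cs close (i + 1) := by
  unfold pvMinJ pvLeast
  have hfc : (cs.zipIdx).filter (fun q => String.ofList [q.1] == close && decide (i < q.2))
      = (cs.zipIdx).filter (fun q => String.ofList [q.1] == close && decide (i + 1 ≤ q.2)) :=
    List.filter_congr (fun q _ => by
      rw [show decide (i < q.2) = decide (i + 1 ≤ q.2) from decide_eq_decide.mpr (by omega)])
  rw [hfc, pv_min_sorted _ (pv_js_pairwise cs _)]

lemma pvLeast_some_iff (cs : List Char) (s : String) (k m : Nat) :
    pvLeast cs s k = some m ↔ pvQ cs s k m ∧ ∀ j, pvQ cs s k j → m ≤ j := by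
  unfold pvLeast
  rw [pv_head_least _ (pv_js_pairwise cs _) m]
  constructor
  · rintro ⟨h1, h2⟩
    exact ⟨(pv_js_mem cs s k m).mp h1, fun j hj => h2 j ((pv_js_mem cs s k j).mpr hj)⟩
  · rintro ⟨h1, h2⟩
    exact ⟨(pv_js_mem cs s k m).mpr h1, fun j hj => h2 j ((pv_js_mem cs s k j).mp hj)⟩

lemma pvLeast_none_iff (cs : List Char) (s : String) (k : Nat) :
    pvLeast cs s k = none ↔ ∀ j, ¬ pvQ cs s k j := by
  unfold pvLeast
  rw [List.head?_eq_none_iff, List.eq_nil_iff_forall_not_mem]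
  constructor
  · intro h j hj
    exact h j ((pv_js_mem cs s k j).mpr hj)
  · intro h x hx
    exact h x ((pv_js_mem cs s k x).mp hx)

lemma pvLeast_step (cs : List Char) (s : String) (k : Nat) (h : k < cs.length) :
    pvLeast cs s k = if String.ofList [cs[k]] = s then some k else pvLeast cs s (k + 1) := by
  by_cases hc : String.ofList [cs[k]] = s
  · rw [if_pos hc, pvLeast_some_iff]
    exact ⟨⟨le_refl k, cs[k], List.getElem?_eq_getElem h, hc⟩, fun j hj => hj.1⟩
  · rw [if_neg hc]
    cases h2 : pvLeast cs s (k + 1) with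
    | some m =>
      rw [pvLeast_some_iff] at h2 ⊢
      obtain ⟨⟨hm1, hm2⟩, hmin⟩ := h2
      refine ⟨⟨by omega, hm2⟩, ?_⟩
      intro j hj
      rcases Nat.eq_or_lt_of_le hj.1 with heq | hlt
      · obtain ⟨c, hcj, hcs⟩ := hj.2
        subst heq
        rw [List.getElem?_eq_getElem h] at hcj
        cases hcj
        exact absurd hcs hc
      · exact hmin j ⟨by omega, hj.2⟩
    | none =>
      rw [pvLeast_none_iff] at h2 ⊢
      intro j hj
      rcases Nat.eq_or_lt_of_le hj.1 with heq | hlt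
      · obtain ⟨c, hcj, hcs⟩ := hj.2
        subst heq
        rw [List.getElem?_eq_getElem h] at hcj
        cases hcj
        exact absurd hcs hc
      · exact h2 j ⟨by omega, hj.2⟩

lemma pvLeast_top (cs : List Char) (s : String) (k : Nat) (h : cs.length ≤ k) :
    pvLeast cs s k = none := by
  rw [pvLeast_none_iff]
  rintro j ⟨hkj, c, hc, -⟩
  obtain ⟨hlt, -⟩ := List.getElem?_eq_some_iff.mp hc
  omega

lemma pvBPre_take (cs : List Char) (M : PySem.Dict String String) :
    ∀ k, k ≤ cs.length → ∀ d : PySem.Dict String Int,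
    (∀ s : String, d.get? s = (pvLeast cs s k).map (fun j => (j : Int))) →
    pvBPre M ((cs.zipIdx).take k).reverse d = (((cs.zipIdx).take k).map (pvEA cs M)).reverse := by
  intro k
  induction k with
  | zero => intro _ d _; simp [pvBPre]
  | succ k ih =>
    intro hk d hd
    have hk' : k < cs.length := by omega
    have htake : (cs.zipIdx).take (k + 1) = (cs.zipIdx).take k ++ [(cs[k], k)] := by
      rw [List.take_succ]
      simp [List.getElem?_zipIdx, List.getElem?_eq_getElem hk']
    rw [htake, List.reverse_append, List.map_append, List.reverse_append]
    simp only [List.reverse_cons, List.reverse_nil, List.nil_append, List.singleton_append,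
      List.map_cons, List.map_nil]
    rw [pvBPre]
    have he : (match M.get? (String.ofList [(cs[k], k).1]) with
        | none => (none : Option Int)
        | some close => d.get? close) = pvEA cs M (cs[k], k) := by
      unfold pvEA
      cases hg : M.get? (String.ofList [(cs[k], k).1]) with
      | none => rfl
      | some close => simp [hd close, pvMinJ_eq_pvLeast]
    rw [ih (by omega) (d.insert (String.ofList [(cs[k], k).1]) (((cs[k], k).2 : Nat) : Int)) ?_]
    · rw [he]
    · intro s
      rw [PySem.Dict.get?_insert, pvLeast_step cs s k hk']
      by_cases hc : s = String.ofList [cs[k]]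
      · rw [if_pos (by simpa using hc), if_pos (by rw [hc])]
        simp
      · rw [if_neg (by simpa using hc), if_neg (fun h => hc h.symm)]
        exact hd s

lemma pvEndAt_eq (cs : List Char) (M : PySem.Dict String String) :
    (pvBPre M (cs.zipIdx).reverse PySem.Dict.empty).reverse = pvEndAt cs M := by
  have h1 : (cs.zipIdx).take cs.length = cs.zipIdx :=
    List.take_of_length_le (by simp [List.length_zipIdx])
  have h2 := pvBPre_take cs M cs.length (le_refl _) PySem.Dict.empty
    (fun s => by rw [PySem.Dict.get?_empty, pvLeast_top cs s cs.length (le_refl _)]; rfl)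
  rw [h1] at h2
  rw [h2, List.reverse_reverse]
  rfl

lemma pvEndAt_getD (cs : List Char) (M : PySem.Dict String String) (m : Nat) (h : m < cs.length) :
    (pvEndAt cs M).getD m none = pvEA cs M (cs[m], m) := by
  unfold pvEndAt
  rw [List.getD_eq_getElem?_getD, List.getElem?_map, List.getElem?_zipIdx,
    List.getElem?_eq_getElem h]
  simp

lemma pvA_fold_fst (cs : List Char) (M : PySem.Dict String String)
    (l : List (Char × Nat)) (acc : List Int) (subs : List String) :
    (l.foldl (pvAStep cs M) (acc, subs)).1 = acc ++ l.flatMap (pvGA cs M) := by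
  induction l generalizing acc subs with
  | nil => simp
  | cons p l ih =>
    simp only [List.foldl_cons, List.flatMap_cons]
    cases hg : M.get? (String.ofList [p.1]) with
    | none =>
      rw [show pvAStep cs M (acc, subs) p = (acc, subs) from by simp [pvAStep, hg], ih]
      simp [pvGA, hg]
    | some close =>
      cases hm : pvMinJ cs close p.2 with
      | none =>
        rw [show pvAStep cs M (acc, subs) p = (acc, subs) from by simp [pvAStep, hg, hm], ih]
        simp [pvGA, hg, hm]
      | some e =>
        rw [show pvAStep cs M (acc, subs) p
            = (acc ++ PySem.List.pyRange (p.2 : Int) ((e : Int) + 1) 1,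
               subs ++ [String.ofList (PySem.List.slice cs (some (p.2 : Int))
                 (some (PySem.List.pyGetD (acc ++ PySem.List.pyRange (p.2 : Int) ((e : Int) + 1) 1) (-1) 0 + 1)))])
          from by simp [pvAStep, hg, hm], ih]
        simp [pvGA, hg, hm, List.append_assoc]

lemma pv_mem_modIdx (cs : List Char) (M : PySem.Dict String String) (kk : Nat) :
    ((kk : Int) ∈ (cs.zipIdx).flatMap (pvGA cs M)) ↔ pvCov cs M kk := by
  rw [List.mem_flatMap]
  unfold pvCov
  constructor
  · rintro ⟨p, hp, hmem⟩
    refine ⟨p, hp, ?_⟩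
    cases hg : M.get? (String.ofList [p.1]) with
    | none => simp [pvGA, hg] at hmem
    | some close =>
      cases hm : pvMinJ cs close p.2 with
      | none => simp [pvGA, hg, hm] at hmem
      | some e =>
        simp only [pvGA, hg, hm] at hmem
        rw [PySem.List.mem_pyRange_one] at hmem
        exact ⟨close, e, rfl, hm, by omega, by omega⟩
  · rintro ⟨p, hp, close, e, hg, hm, h1, h2⟩
    refine ⟨p, hp, ?_⟩
    simp only [pvGA, hg, hm]
    rw [PySem.List.mem_pyRange_one]
    omega

lemma pvCovB_iff (cs : List Char) (M : PySem.Dict String String) (kk : Nat) :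
    pvCovB cs M kk = true ↔ pvCov cs M kk := by
  unfold pvCovB pvCov
  rw [List.any_eq_true]
  constructor
  · rintro ⟨p, hp, hb⟩
    refine ⟨p, hp, ?_⟩
    cases hg : M.get? (String.ofList [p.1]) with
    | none => simp [hg] at hb
    | some close =>
      cases hm : pvMinJ cs close p.2 with
      | none => simp [hg, hm] at hb
      | some e =>
        simp only [hg, hm, decide_eq_true_eq] at hb
        exact ⟨close, e, rfl, hm, hb⟩
  · rintro ⟨p, hp, close, e, hg, hm, hrange⟩
    refine ⟨p, hp, ?_⟩
    simp only [hg, hm, decide_eq_true_eq]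
    exact hrange

lemma pv_skip_iff (cs : List Char) (M : PySem.Dict String String) (m : Nat) (hm : m < cs.length) :
    ((m : Int) ≤ pvSkip cs M ((cs.zipIdx).take (m + 1))) ↔ pvCov cs M m := by
  unfold pvSkip
  constructor
  · intro h
    rcases PySem.List.foldl_max_mem (((cs.zipIdx).take (m + 1)).filterMap (pvEA cs M)) (-1) with
      hneg | hmem
    · rw [hneg] at h; omega
    · obtain ⟨p, hp, hpe⟩ := List.mem_filterMap.mp hmem
      have hpz : p ∈ cs.zipIdx := List.mem_of_mem_take hp
      have hple : p.2 ≤ m := by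
        have := (pv_mem_take_zipIdx cs (m + 1) p).mp hp
        omega
      cases hg : M.get? (String.ofList [p.1]) with
      | none => simp [pvEA, hg] at hpe
      | some close =>
        cases hmj : pvMinJ cs close p.2 with
        | none => simp [pvEA, hg, hmj] at hpe
        | some e =>
          have h2 : pvEA cs M p = some ((e : Nat) : Int) := by simp [pvEA, hg, hmj]
          rw [h2] at hpe
          injection hpe with hv
          refine ⟨p, hpz, close, e, hg, hmj, hple, ?_⟩
          omega
  · rintro ⟨p, hp, close, e, hg, hmj, h1, h2⟩
    have hpt : p ∈ (cs.zipIdx).take (m + 1) := by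
      rw [pv_mem_take_zipIdx]
      exact ⟨by omega, (pv_mem_zipIdx_iff cs p).mp hp⟩
    have hea : pvEA cs M p = some ((e : Nat) : Int) := by
      simp [pvEA, hg, hmj]
    have hmemE : ((e : Nat) : Int) ∈ ((cs.zipIdx).take (m + 1)).filterMap (pvEA cs M) :=
      List.mem_filterMap.mpr ⟨p, hpt, hea⟩
    have := (PySem.List.le_foldl_max (((cs.zipIdx).take (m + 1)).filterMap (pvEA cs M)) (-1)).2
      _ hmemE
    have hme : (m : Int) ≤ ((e : Nat) : Int) := by exact_mod_cast h2
    omega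

lemma pv_if_max (a b : Int) : (if a > b then a else b) = max b a := by omega

lemma pvB_fold (cs : List Char) (M : PySem.Dict String String)
    (hpre : ∀ p ∈ cs.zipIdx, ∀ close, M.get? (String.ofList [p.1]) = some close →
      (pvMinJ cs close p.2).isSome) :
    ∀ m, m ≤ cs.length → ∃ subs,
      ((cs.zipIdx).take m).foldl (pvBStep cs M (pvEndAt cs M)) ([], [], -1)
        = ((((cs.zipIdx).take m).filter (fun p => !pvCovB cs M p.2)).map (fun p => p.1),
           subs, pvSkip cs M ((cs.zipIdx).take m)) := by
  intro m
  induction m with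
  | zero => exact fun _ => ⟨[], by simp [pvSkip]⟩
  | succ m ih =>
    intro hm
    have hm' : m < cs.length := by omega
    obtain ⟨subs, hIH⟩ := ih (by omega)
    have htake : (cs.zipIdx).take (m + 1) = (cs.zipIdx).take m ++ [(cs[m], m)] := by
      rw [List.take_succ]
      simp [List.getElem?_zipIdx, List.getElem?_eq_getElem hm']
    rw [htake, List.foldl_append, hIH]
    have hmemz : ((cs[m], m) : Char × Nat) ∈ cs.zipIdx := by
      rw [pv_mem_zipIdx_iff]; exact List.getElem?_eq_getElem hm'
    by_cases hco : M.contains (String.ofList [cs[m]]) = true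
    · -- opener at m
      obtain ⟨close, hg⟩ : ∃ close, M.get? (String.ofList [cs[m]]) = some close := by
        rw [PySem.Dict.contains_eq_isSome_get?] at hco
        exact Option.isSome_iff_exists.mp hco
      obtain ⟨e, hmj⟩ := Option.isSome_iff_exists.mp (hpre _ hmemz close hg)
      have hea : pvEA cs M (cs[m], m) = some ((e : Nat) : Int) := by
        simp [pvEA, hg, hmj]
      have hget : (pvEndAt cs M).getD m none = some ((e : Nat) : Int) := by
        rw [pvEndAt_getD cs M m hm', hea]
      have hskip : pvSkip cs M ((cs.zipIdx).take m ++ [(cs[m], m)])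
          = max (pvSkip cs M ((cs.zipIdx).take m)) ((e : Nat) : Int) := by
        unfold pvSkip
        rw [List.filterMap_append, List.foldl_append]
        simp [hea]
      have hiff : ((m : Int) ≤ max (pvSkip cs M ((cs.zipIdx).take m)) ((e : Nat) : Int))
          ↔ pvCov cs M m := by
        rw [← hskip, ← htake]
        exact pv_skip_iff cs M m hm'
      refine ⟨subs ++ [String.ofList (PySem.List.slice cs (some (m : Int))
        (some (((e : Nat) : Int) + 1)))], ?_⟩
      simp only [List.foldl_cons, List.foldl_nil]
      simp only [pvBStep, hco, if_true, hget]
      rw [List.filter_append, List.map_append]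
      by_cases hcov : pvCov cs M m
      · have hcb : pvCovB cs M m = true := (pvCovB_iff cs M m).mpr hcov
        have hle := hiff.mpr hcov
        have hnot : ¬ ((m : Int) > (if ((e : Nat) : Int) > pvSkip cs M ((cs.zipIdx).take m)
            then ((e : Nat) : Int) else pvSkip cs M ((cs.zipIdx).take m))) := by
          rw [pv_if_max]; omega
        rw [if_neg hnot, pv_if_max, hskip]
        simp [hcb]
      · have hcb : pvCovB cs M m = false :=
          Bool.eq_false_iff.mpr (fun h => hcov ((pvCovB_iff cs M m).mp h))
        have hgt : ¬ ((m : Int) ≤ max (pvSkip cs M ((cs.zipIdx).take m)) ((e : Nat) : Int)) :=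
          fun h => hcov (hiff.mp h)
        have hyes : ((m : Int) > (if ((e : Nat) : Int) > pvSkip cs M ((cs.zipIdx).take m)
            then ((e : Nat) : Int) else pvSkip cs M ((cs.zipIdx).take m))) := by
          rw [pv_if_max]; omega
        rw [if_pos hyes, pv_if_max, hskip]
        simp [hcb]
    · -- not an opener at m
      have hco' : M.contains (String.ofList [cs[m]]) = false := Bool.eq_false_iff.mpr hco
      have hg : M.get? (String.ofList [cs[m]]) = none := by
        cases hgg : M.get? (String.ofList [cs[m]]) with
        | none => rfl
        | some v =>
          rw [PySem.Dict.contains_eq_isSome_get?, hgg] at hco'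
          simp at hco'
      have hea : pvEA cs M (cs[m], m) = none := by simp [pvEA, hg]
      have hskip : pvSkip cs M ((cs.zipIdx).take m ++ [(cs[m], m)])
          = pvSkip cs M ((cs.zipIdx).take m) := by
        unfold pvSkip
        rw [List.filterMap_append]
        simp [hea]
      have hiff : ((m : Int) ≤ pvSkip cs M ((cs.zipIdx).take m)) ↔ pvCov cs M m := by
        rw [← hskip, ← htake]
        exact pv_skip_iff cs M m hm'
      refine ⟨subs, ?_⟩
      simp only [List.foldl_cons, List.foldl_nil]
      simp only [pvBStep, hco', Bool.false_eq_true, if_false]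
      rw [List.filter_append, List.map_append]
      by_cases hcov : pvCov cs M m
      · have hcb : pvCovB cs M m = true := (pvCovB_iff cs M m).mpr hcov
        have hng : ¬ ((m : Int) > pvSkip cs M ((cs.zipIdx).take m)) := by
          have := hiff.mpr hcov; omega
        rw [if_neg hng, hskip]
        simp [hcb]
      · have hcb : pvCovB cs M m = false :=
          Bool.eq_false_iff.mpr (fun h => hcov ((pvCovB_iff cs M m).mp h))
        have hpos : ((m : Int) > pvSkip cs M ((cs.zipIdx).take m)) := by
          by_contra hng
          exact hcov (hiff.mp (by omega))
        rw [if_pos hpos, hskip]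
        simp [hcb]

-- ===== VERDICT (by name: the statement is the Claim_ definition above) =====
theorem remove_substrings_sequence_spec : Claim_equal_remove_substrings_sequence := by
  intro seq markers rs hdom hpre
  obtain ⟨hrs, hok⟩ := hpre
  subst hrs
  unfold Spec_remove_substrings_sequence remove_substrings_sequence remove_substrings_sequence_alt
  simp only [Bool.false_eq_true, if_false]
  set cs := seq.toList with hcs
  set M := PySem.Dict.mk markers with hM
  -- Pre_ gives: every opener has a later matching closer
  have hpre' : ∀ p ∈ cs.zipIdx, ∀ close, M.get? (String.ofList [p.1]) = some close →
      (pvMinJ cs close p.2).isSome := by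
    intro p hp close hg
    have hall := List.all_eq_true.mp hok p hp
    rw [hg] at hall
    obtain ⟨q, hq, hqb⟩ := List.any_eq_true.mp hall
    simp only [Bool.and_eq_true, beq_iff_eq, decide_eq_true_eq] at hqb
    obtain ⟨hqs, hqk⟩ := hqb
    have hQ : pvQ cs close (p.2 + 1) q.2 :=
      ⟨by omega, q.1, (pv_mem_zipIdx_iff cs q).mp hq, hqs⟩
    rw [pvMinJ_eq_pvLeast]
    cases hL : pvLeast cs close (p.2 + 1) with
    | none => exact absurd hQ ((pvLeast_none_iff cs close (p.2 + 1)).mp hL q.2)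
    | some v => rfl
  -- B side
  rw [pvEndAt_eq cs M]
  have htl : (cs.zipIdx).take cs.length = cs.zipIdx :=
    List.take_of_length_le (by simp [List.length_zipIdx])
  obtain ⟨subs, hB⟩ := pvB_fold cs M hpre' cs.length (le_refl _)
  rw [htl] at hB
  rw [hB]
  have hproj : ((((cs.zipIdx).filter (fun p => !pvCovB cs M p.2)).map (fun p => p.1), subs,
      pvSkip cs M cs.zipIdx) : List Char × List String × Int).1
      = ((cs.zipIdx).filter (fun p => !pvCovB cs M p.2)).map (fun p => p.1) := rfl
  rw [hproj]
  -- A side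
  have hA : (((cs.zipIdx).foldl (pvAStep cs M) ([], [])).1) = (cs.zipIdx).flatMap (pvGA cs M) := by
    rw [pvA_fold_fst cs M _ [] [], List.nil_append]
  rw [hA]
  refine congrArg String.ofList (congrArg (List.map _) (List.filter_congr ?_))
  intro p hp
  have hc : ((cs.zipIdx).flatMap (pvGA cs M)).contains ((p.2 : Int)) = pvCovB cs M p.2 := by
    rw [Bool.eq_iff_iff]
    constructor
    · intro h
      exact (pvCovB_iff cs M p.2).mpr ((pv_mem_modIdx cs M p.2).mp (by simpa using h))
    · intro h
      have := (pv_mem_modIdx cs M p.2).mpr ((pvCovB_iff cs M p.2).mp h)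
      simpa using this
  simp only [hc]
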